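-- pv_equiv track=rewrite | github.com/paiml/depyler | examples/hard_sci_thermo_entropy.py | entropy_heating
-- ===== SOURCE A (Python) =====
-- def entropy_heating(mass: int, specific_heat: int, t_initial: int, t_final: int) -> int:
--     """Entropy change for heating: dS = m*c*ln(Tf/Ti).
--     ln approx: ln(1+x) ~ x - x^2/2 for small x.
--     For larger ratios, use repeated halving. Scale 1000."""
--     if t_initial <= 0 or t_final <= 0:
--         return 0
--     ratio: int = (t_final * 1000) // t_initial
--     ln_val: int = 0
--     temp_ratio: int = ratio
--     scale_count: int = 0
--     while temp_ratio > 2000: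
--         temp_ratio = temp_ratio // 2
--         scale_count = scale_count + 1
--     x: int = temp_ratio - 1000
--     ln_val = x - (x * x) // 2000
--     ln_val = ln_val + scale_count * 693
--     result: int = (mass * specific_heat * ln_val) // (1000 * 1000)
--     return result
-- ===== SOURCE B (Python) =====
-- def entropy_heating(mass: int, specific_heat: int, t_initial: int, t_final: int) -> int:
--     """Same entropy approximation, but the halving loop is replaced by a
--     closed-form shift count derived from the ratio's bit length."""
--     if t_initial <= 0 or t_final <= 0:
--         return 0
--     ratio = (t_final * 1000) // t_initial
--     if ratio <= 2000:
--         k = 0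
--     else:
--         k = ratio.bit_length() - 11
--         if (ratio >> k) > 2000:
--             k += 1
--     temp = ratio >> k
--     x = temp - 1000
--     ln_val = x - (x * x) // 2000 + k * 693
--     return (mass * specific_heat * ln_val) // (1000 * 1000)
-- ===== Notes on version B (the rewrite author's own statement) =====
-- stated objective: alternative
-- what changed: The repeated-halving while-loop that computes the scale count is replaced by a closed-form shift count derived from ratio.bit_length() (with a single one-step adjustment), the rest of the arithmetic is unchanged.
import Mathlib
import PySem

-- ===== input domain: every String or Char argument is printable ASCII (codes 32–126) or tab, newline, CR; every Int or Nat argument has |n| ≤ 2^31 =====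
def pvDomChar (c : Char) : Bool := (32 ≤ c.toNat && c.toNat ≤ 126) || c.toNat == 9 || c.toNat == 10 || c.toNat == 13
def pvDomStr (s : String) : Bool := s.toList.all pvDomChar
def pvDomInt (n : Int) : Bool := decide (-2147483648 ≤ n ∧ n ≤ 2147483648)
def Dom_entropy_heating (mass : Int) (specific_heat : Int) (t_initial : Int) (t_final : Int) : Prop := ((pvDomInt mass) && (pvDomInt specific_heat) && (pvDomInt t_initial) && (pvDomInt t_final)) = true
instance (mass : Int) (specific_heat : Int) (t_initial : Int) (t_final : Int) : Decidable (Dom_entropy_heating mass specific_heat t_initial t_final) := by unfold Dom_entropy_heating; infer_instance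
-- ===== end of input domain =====

-- B replaces A's repeated-halving loop by a closed-form shift count from the ratio's bit length (objective: alternative; same result, proved equal).

-- ===== PORT A =====
-- A's `while temp_ratio > 2000: temp_ratio //= 2; scale_count += 1` loop, step for step.
def pvHalveLoop (t : Int) (c : Int) : Int × Int :=
  if h : 2000 < t then pvHalveLoop (PySem.Int.floordiv t 2) (c + 1) else (t, c)
termination_by t.toNat
decreasing_by
  rw [PySem.Int.floordiv_eq_ediv_of_pos (by omega)]
  omega

def entropy_heating (mass : Int) (specific_heat : Int) (t_initial : Int) (t_final : Int) : Int :=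
  if t_initial ≤ 0 ∨ t_final ≤ 0 then 0
  else
    let ratio : Int := PySem.Int.floordiv (t_final * 1000) t_initial
    let p := pvHalveLoop ratio 0
    let x : Int := p.1 - 1000
    let ln_val : Int := x - PySem.Int.floordiv (x * x) 2000 + p.2 * 693
    PySem.Int.floordiv (mass * specific_heat * ln_val) (1000 * 1000)

-- ===== PORT B =====
def entropy_heating_alt (mass : Int) (specific_heat : Int) (t_initial : Int) (t_final : Int) : Int :=
  if t_initial ≤ 0 ∨ t_final ≤ 0 then 0
  else
    let ratio : Int := PySem.Int.floordiv (t_final * 1000) t_initial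
    let k : Nat :=
      if ratio ≤ 2000 then 0
      else
        let k0 := PySem.Int.bitLength ratio - 11
        if 2000 < ratio >>> k0 then k0 + 1 else k0
    let temp : Int := ratio >>> k
    let x : Int := temp - 1000
    let ln_val : Int := x - PySem.Int.floordiv (x * x) 2000 + (k : Int) * 693
    PySem.Int.floordiv (mass * specific_heat * ln_val) (1000 * 1000)

-- ===== PRECONDITION & SPEC =====
def Spec_entropy_heating (mass : Int) (specific_heat : Int) (t_initial : Int) (t_final : Int) (out : Int) : Prop := out = entropy_heating_alt mass specific_heat t_initial t_final
instance (mass : Int) (specific_heat : Int) (t_initial : Int) (t_final : Int) (out : Int) : Decidable (Spec_entropy_heating mass specific_heat t_initial t_final out) := by unfold Spec_entropy_heating; infer_instance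

-- ===== CLAIM (what is proved, stated in full; the proofs are below) =====
def Claim_equal_entropy_heating : Prop := ∀ (mass : Int) (specific_heat : Int) (t_initial : Int) (t_final : Int), Dom_entropy_heating mass specific_heat t_initial t_final → Spec_entropy_heating mass specific_heat t_initial t_final (entropy_heating mass specific_heat t_initial t_final)

-- ===== LEMMAS AND PROOFS =====

-- Number of halvings A's loop performs on a nonnegative ratio n.
def pvK (n : Nat) : Nat :=
  if 2000 < n then pvK (n / 2) + 1 else 0
decreasing_by omega

theorem pvK_le (n : Nat) : n >>> pvK n ≤ 2000 := by
  induction n using pvK.induct with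
  | case1 n h ih =>
    rw [pvK, if_pos h, Nat.add_comm, Nat.shiftRight_add]
    simpa [Nat.shiftRight_succ, Nat.shiftRight_eq_div_pow] using ih
  | case2 n h =>
    rw [pvK, if_neg h]
    simpa using Nat.le_of_not_lt h

theorem pvK_gt (n : Nat) : ∀ j < pvK n, 2000 < n >>> j := by
  induction n using pvK.induct with
  | case1 n h ih =>
    intro j hj
    cases j with
    | zero => simpa using h
    | succ j' =>
      rw [pvK, if_pos h] at hj
      have := ih j' (by omega)
      rw [Nat.add_comm, Nat.shiftRight_add]
      simpa [Nat.shiftRight_succ, Nat.shiftRight_eq_div_pow] using this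
  | case2 n h =>
    intro j hj
    rw [pvK, if_neg h] at hj
    omega

theorem pvK_unique (n k : Nat) (h1 : n >>> k ≤ 2000) (h2 : ∀ j < k, 2000 < n >>> j) :
    k = pvK n := by
  rcases Nat.lt_trichotomy k (pvK n) with h | h | h
  · exact absurd (pvK_gt n k h) (by omega)
  · exact h
  · exact absurd (h2 (pvK n) h) (by have := pvK_le n; omega)

-- A's loop computes exactly (n >>> pvK n, c + pvK n).
theorem pvHalveLoop_eq (n : Nat) (c : Int) :
    pvHalveLoop (n : Int) c = (((n >>> pvK n : Nat) : Int), c + (pvK n : Int)) := by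
  induction n using pvK.induct generalizing c with
  | case1 n h ih =>
    rw [pvHalveLoop, dif_pos (by exact_mod_cast h)]
    rw [show PySem.Int.floordiv (n : Int) 2 = ((n / 2 : Nat) : Int) from by
      exact_mod_cast PySem.Int.floordiv_natCast n 2]
    have hK : pvK n = pvK (n / 2) + 1 := by rw [pvK]; simp [h]
    rw [hK, ih]
    simp only [Prod.mk.injEq]
    refine ⟨?_, by push_cast; ring⟩
    congr 1
    rw [Nat.add_comm, Nat.shiftRight_add]
    simp [Nat.shiftRight_succ, Nat.shiftRight_eq_div_pow]
  | case2 n h =>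
    rw [pvHalveLoop, dif_neg (by exact_mod_cast h), pvK, if_neg h]
    simp

-- shift monotone / bounds helpers
theorem pvShift_anti (n : Nat) {i j : Nat} (h : i ≤ j) : n >>> j ≤ n >>> i := by
  simp only [Nat.shiftRight_eq_div_pow]
  exact Nat.div_le_div_left (Nat.pow_le_pow_right (by norm_num) h) (Nat.two_pow_pos i)

-- B's closed-form shift count equals pvK.
theorem pvKB_eq (n : Nat) :
    (if (n : Int) ≤ 2000 then 0
     else
       let k0 := PySem.Int.bitLength (n : Int) - 11
       if 2000 < (n : Int) >>> k0 then k0 + 1 else k0) = pvK n := by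
  by_cases hle : n ≤ 2000
  · rw [if_pos (by exact_mod_cast hle), pvK, if_neg (by omega)]
  · rw [if_neg (by exact_mod_cast hle)]
    have hn : 2000 < n := by omega
    set s := PySem.Int.bitLength (n : Int) with hs
    have hub : n < 2 ^ s := by
      have := PySem.Int.lt_two_pow_bitLength (n : Int); simpa [← hs] using this
    have hlb : 2 ^ (s - 1) ≤ n := by
      have := PySem.Int.two_pow_bitLength_le (n : Int) (by exact_mod_cast (by omega : n ≠ 0))
      simpa [← hs] using this
    have hs11 : 11 ≤ s := by
      by_contra hc
      have h1 : (2:Nat) ^ s ≤ 2 ^ 10 := Nat.pow_le_pow_right (by norm_num) (by omega)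
      have h2 : (2:Nat) ^ 10 = 1024 := by norm_num
      omega
    have hcast : ((n : Int) >>> (s - 11)) = ((n >>> (s - 11) : Nat) : Int) := by
      simp [Int.natCast_shiftRight]
    -- key bound: shifting by (s-11)+1 lands ≤ 2000
    have hB : n >>> (s - 11 + 1) ≤ 2000 := by
      have : n >>> (s - 10) < 2 ^ 10 := by
        rw [Nat.shiftRight_eq_div_pow]
        apply Nat.div_lt_of_lt_mul
        calc n < 2 ^ s := hub
        _ ≤ 2 ^ (s - 10) * 2 ^ 10 := by rw [← pow_add]; exact Nat.pow_le_pow_right (by norm_num) (by omega)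
      have he : s - 11 + 1 = s - 10 := by omega
      rw [he]; omega
    -- key bound: shifting by less than s-11 stays > 2000
    have hA : ∀ j < s - 11, 2000 < n >>> j := by
      intro j hj
      have h12 : 12 ≤ s := by omega
      have : 2 ^ 11 ≤ n >>> (s - 12) := by
        rw [Nat.shiftRight_eq_div_pow]
        apply Nat.le_div_iff_mul_le (Nat.two_pow_pos _) |>.mpr
        calc 2 ^ 11 * 2 ^ (s - 12) = 2 ^ (s - 1) := by rw [← pow_add]; congr 1; omega
        _ ≤ n := hlb
      have := pvShift_anti n (show j ≤ s - 12 by omega)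
      omega
    by_cases hmid : 2000 < (n : Int) >>> (s - 11)
    · rw [if_pos hmid]
      have hmidN : 2000 < n >>> (s - 11) := by
        rw [hcast] at hmid; exact_mod_cast hmid
      apply pvK_unique n _ hB
      intro j hj
      rcases Nat.lt_or_ge j (s - 11) with h | h
      · exact hA j h
      · have : j = s - 11 := by omega
        simpa [this] using hmidN
    · rw [if_neg hmid]
      have hmidN : n >>> (s - 11) ≤ 2000 := by
        rw [hcast] at hmid; exact_mod_cast Int.not_lt.mp hmid
      exact pvK_unique n _ hmidN hA

-- ===== VERDICT (by name: the statement is the Claim_ definition above) =====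
theorem entropy_heating_spec : Claim_equal_entropy_heating := by
  intro mass specific_heat t_initial t_final _
  unfold Spec_entropy_heating entropy_heating entropy_heating_alt
  by_cases hz : t_initial ≤ 0 ∨ t_final ≤ 0
  · simp [hz]
  · rw [if_neg hz, if_neg hz]
    push Not at hz
    obtain ⟨hi, hf⟩ := hz
    set ratio := PySem.Int.floordiv (t_final * 1000) t_initial with hr
    have hpos : 0 ≤ ratio := by
      rw [hr, PySem.Int.floordiv_eq_ediv_of_pos hi]
      exact Int.ediv_nonneg (by positivity) (by omega)
    obtain ⟨n, hn⟩ : ∃ n : Nat, ratio = (n : Int) := ⟨ratio.toNat, (Int.toNat_of_nonneg hpos).symm⟩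
    rw [hn]
    simp only [pvHalveLoop_eq n 0, pvKB_eq n, Int.natCast_shiftRight, zero_add]
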